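-- pv_equiv track=rewrite | github.com/h44256/OpenCV_readGround_sideProject | OpenCV_Mouse_Ground_Plus.py | reselect_y_coordinates
-- ===== SOURCE A (Python) =====
-- def reselect_y_coordinates(coordinates_lst):
--     coordinates_lst = sorted(coordinates_lst)
--     bag = []
--     result = []
--     result.append(coordinates_lst[0])
--     for i in coordinates_lst:
--         if len(bag) == 0:
--             bag.append(i)
--         else:
--             if i-bag[-1] <=3:               #判斷連號 後面像素-前面像素<=多少算連號 越大越不準
--                 bag.append(i)
--             else:
--                 if len(bag) >=2:            #若連號的數量>=5
--                     result.append(bag[-1])  #把最後一號記錄下來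
--                 bag.clear()
--                 bag.append(i)
--     result.append(i)
--     return result
-- ===== SOURCE B (Python) =====
-- def reselect_y_coordinates(coordinates_lst):
--     s = sorted(coordinates_lst)
--     mids = [b for a, b, c in zip(s, s[1:], s[2:]) if c - b > 3 and b - a <= 3]
--     return [s[0]] + mids + [s[-1]]
-- ===== Notes on version B (the rewrite author's own statement) =====
-- stated objective: simpler
-- what changed: Eliminates A's rolling-bag clustering state entirely: B uses a closed-form neighbour test on the sorted list (an interior element is kept iff its gap to the successor exceeds 3 and its gap to the predecessor is at most 3), computed as one comprehension over a triple zip of the sorted list with its two shifted copies, framed by the smallest and largest elements.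
-- outside the precondition, e.g. on reselect_y_coordinates([]): A raises IndexError, B raises IndexError
import Mathlib
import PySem

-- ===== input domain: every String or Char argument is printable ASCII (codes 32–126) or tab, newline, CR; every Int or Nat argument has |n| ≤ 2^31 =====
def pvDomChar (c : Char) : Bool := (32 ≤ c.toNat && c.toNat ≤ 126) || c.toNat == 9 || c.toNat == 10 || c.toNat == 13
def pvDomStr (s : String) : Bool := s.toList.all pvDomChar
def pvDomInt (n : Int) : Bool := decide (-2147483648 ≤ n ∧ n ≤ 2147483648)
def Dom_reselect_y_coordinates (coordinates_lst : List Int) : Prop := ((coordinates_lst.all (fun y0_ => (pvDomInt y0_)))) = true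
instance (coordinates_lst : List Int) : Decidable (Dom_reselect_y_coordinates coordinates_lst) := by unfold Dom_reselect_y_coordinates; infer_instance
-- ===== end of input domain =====

-- B drops A's rolling-bag clustering state and instead tests each interior sorted element
-- against its two neighbours (successor gap > 3, predecessor gap ≤ 3) — objective: simpler.

-- ===== PORT A =====
-- one step of A's for-loop; state = (bag, result)
def pvAStep (acc : List Int × List Int) (i : Int) : List Int × List Int :=
  let bag := acc.1
  let result := acc.2
  if bag.length = 0 then (bag ++ [i], result)
  else if i - (bag.getLast?.getD 0) ≤ 3 then (bag ++ [i], result)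
  else
    let result := if bag.length ≥ 2 then result ++ [bag.getLast?.getD 0] else result
    ([i], result)

def reselect_y_coordinates (coordinates_lst : List Int) : List Int :=
  let s := PySem.List.sorted coordinates_lst (fun x => x) false
  match s with
  | [] => []   -- Python raises IndexError on the empty list; excluded by Pre_
  | x :: _ =>
    let st := s.foldl pvAStep ([], [x])
    -- after the loop, 'i' is the last element of s
    st.2 ++ [s.getLast?.getD 0]

-- ===== PORT B =====
def reselect_y_coordinates_alt (coordinates_lst : List Int) : List Int :=
  let s := PySem.List.sorted coordinates_lst (fun x => x) false
  match s with
  | [] => []   -- Source B raises IndexError on the empty list; excluded by Pre_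
  | x :: _ =>
    -- [b for a, b, c in zip(s, s[1:], s[2:]) if c - b > 3 and b - a <= 3]
    let mids := (((s.zip (PySem.List.slice s (some 1) none)).zip (PySem.List.slice s (some 2) none)).filter
        (fun p => decide (p.2 - p.1.2 > 3) && decide (p.1.2 - p.1.1 ≤ 3))).map (fun p => p.1.2)
    [x] ++ mids ++ [s.getLast?.getD 0]

-- ===== PRECONDITION & SPEC =====
-- Pre_ excludes only the empty list, on which both Pythons raise IndexError.
def Pre_reselect_y_coordinates (coordinates_lst : List Int) : Prop := coordinates_lst ≠ []
instance (coordinates_lst : List Int) : Decidable (Pre_reselect_y_coordinates coordinates_lst) := by unfold Pre_reselect_y_coordinates; infer_instance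
def pvWitness_reselect_y_coordinates : List Int := [6, 1, 5, 20]

def Spec_reselect_y_coordinates (coordinates_lst : List Int) (out : List Int) : Prop := out = reselect_y_coordinates_alt coordinates_lst
instance (coordinates_lst : List Int) (out : List Int) : Decidable (Spec_reselect_y_coordinates coordinates_lst out) := by unfold Spec_reselect_y_coordinates; infer_instance

-- ===== CLAIM (what is proved, stated in full; the proofs are below) =====
def Claim_equal_reselect_y_coordinates : Prop := ∀ (coordinates_lst : List Int), Dom_reselect_y_coordinates coordinates_lst → Pre_reselect_y_coordinates coordinates_lst → Spec_reselect_y_coordinates coordinates_lst (reselect_y_coordinates coordinates_lst)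

-- ===== LEMMAS AND PROOFS =====

-- proof-side middle-emission recursion: v = last element seen, big = "v had a predecessor at gap ≤ 3";
-- emit v when the next element is more than 3 away and big holds
def pvMids : Int → Bool → List Int → List Int
  | _, _, [] => []
  | v, big, x :: xs =>
    if x - v ≤ 3 then pvMids x true xs
    else (if big then [v] else []) ++ pvMids x false xs

-- B's zip/filter/map expression
def pvZipMids (s : List Int) : List Int :=
  (((s.zip (s.drop 1)).zip (s.drop 2)).filter
      (fun p => decide (p.2 - p.1.2 > 3) && decide (p.1.2 - p.1.1 ≤ 3))).map (fun p => p.1.2)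

theorem aLoop (l : List Int) (bag res : List Int) (hb : bag ≠ []) :
    (l.foldl pvAStep (bag, res)).2
      = res ++ pvMids (bag.getLast?.getD 0) (decide (bag.length ≥ 2)) l := by
  induction l generalizing bag res with
  | nil => simp [pvMids]
  | cons x xs ih =>
    simp only [List.foldl_cons, pvAStep, pvMids]
    have hlen : ¬ bag.length = 0 := by simpa using hb
    by_cases h : x - bag.getLast?.getD 0 ≤ 3
    · simp only [hlen, if_false, h, if_true]
      rw [ih (bag ++ [x]) res (by simp)]
      have h1 : 1 ≤ bag.length := List.length_pos_iff.mpr hb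
      simp [h1]
    · simp only [hlen, if_false, h, if_false]
      rw [ih [x] _ (by simp)]
      by_cases h2 : bag.length ≥ 2 <;> simp [h2]

theorem zipMids_eq (l : List Int) : ∀ (a b : Int),
    pvZipMids (a :: b :: l) = pvMids b (decide (b - a ≤ 3)) l := by
  induction l with
  | nil => intro a b; simp [pvZipMids, pvMids]
  | cons c r ih =>
    intro a b
    have hstep : pvZipMids (a :: b :: c :: r)
        = (if c - b > 3 ∧ b - a ≤ 3 then [b] else []) ++ pvZipMids (b :: c :: r) := by
      simp only [pvZipMids, List.drop_succ_cons, List.drop_zero,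
        List.zip_cons_cons, List.filter_cons]
      by_cases h : c - b > 3 ∧ b - a ≤ 3
      · simp [h.1, h.2]
      · have h' : ¬(3 < c - b ∧ b ≤ 3 + a) := fun hc => h ⟨by omega, by omega⟩
        simp [h']
    rw [hstep, ih b c]
    simp only [pvMids]
    by_cases h : c - b ≤ 3
    · have : ¬ (c - b > 3 ∧ b - a ≤ 3) := by omega
      simp [h]
    · have h3 : c - b > 3 := by omega
      by_cases h2 : b - a ≤ 3
      · simp [h, h2, h3]
      · simp [h, h2, h3]

theorem mids_start (x : Int) (xs : List Int) :
    pvZipMids (x :: xs) = pvMids x false xs := by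
  cases xs with
  | nil => simp [pvZipMids, pvMids]
  | cons b l =>
    rw [zipMids_eq l x b]
    simp only [pvMids]
    by_cases h : b - x ≤ 3 <;> simp [h]

-- ===== VERDICT (by name: the statement is the Claim_ definition above) =====
theorem reselect_y_coordinates_spec : Claim_equal_reselect_y_coordinates := by
  intro l _ hpre
  unfold Spec_reselect_y_coordinates reselect_y_coordinates reselect_y_coordinates_alt
  have hne : PySem.List.sorted l (fun x => x) false ≠ [] := by
    intro h
    have hp := PySem.List.sorted_perm l (fun x => x) false
    rw [h] at hp
    exact hpre hp.symm.eq_nil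
  cases hs : PySem.List.sorted l (fun x => x) false with
  | nil => exact absurd hs hne
  | cons x xs =>
    simp only
    rw [show (x :: xs).foldl pvAStep ([], [x]) = xs.foldl pvAStep ([x], [x]) by
          simp [pvAStep],
        aLoop xs [x] [x] (by simp)]
    have hsl : ∀ (s : List Int),
        (((s.zip (PySem.List.slice s (some 1) none)).zip (PySem.List.slice s (some 2) none)).filter
          (fun p => decide (p.2 - p.1.2 > 3) && decide (p.1.2 - p.1.1 ≤ 3))).map (fun p => p.1.2)
        = pvZipMids s := by
      intro s
      rw [show ((1 : Int)) = ((1 : Nat) : Int) by norm_num,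
          show ((2 : Int)) = ((2 : Nat) : Int) by norm_num,
          PySem.List.slice_from_natCast, PySem.List.slice_from_natCast]
      rfl
    rw [hsl, mids_start]
    simp
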